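-- pv_equiv track=rewrite | github.com/AlanJohnM/CPSC-532W-Graduate-Probabilistic-Programming | metropolis_hastings_in_gibbs.py | markov_blankie
-- ===== SOURCE A (Python) =====
-- def markov_blankie(V, A):
--     for v in V:
--         if v not in A.keys():
--             A[v] = []
--     blanket = {v:[c for c in A[v]] for v in V} # deals with the children
--     for v in V:
--         for c in A[v]:
--             if v not in blanket[c]:
--                 blanket[c].append(v) # deals with parents
--     for v in V:
--         for a in A[v]:
--             for v_prime in V:
--                 if v != v_prime and a in A[v_prime] and v_prime not in blanket[v]:
--                     blanket[v].append(v_prime) # parents of children (that are not you)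
--     return blanket
-- ===== SOURCE B (Python) =====
-- # B: precompute a reverse index parents[c] (all parents of c, in V order, one entry
-- # per edge), then assemble each node's blanket in a single per-node pass:
-- # children ++ parents ++ co-parents.  Like A, completes the dict A in place.
-- def markov_blankie(V, A):
--     for v in V:
--         A.setdefault(v, [])
--     parents = {v: [] for v in V}
--     for p in V:
--         for c in A[p]:
--             parents[c].append(p)
--     blanket = {}
--     for v in V:
--         if v not in blanket:
--             b = list(A[v])
--             for p in parents[v]:
--                 if p not in b:
--                     b.append(p)
--             for c in A[v]:
--                 for q in parents[c]:
--                     if q != v and q not in b: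
--                         b.append(q)
--             blanket[v] = b
--     return blanket
-- ===== Notes on version B (the rewrite author's own statement) =====
-- stated objective: faster
-- what changed: B precomputes a reverse index parents[c] of each node's parents in one pass over the edges and then assembles every blanket per node from children + parents[v] + parents of each child, instead of A's triple loop that rescans all of V for every edge to find co-parents.
import Mathlib
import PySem

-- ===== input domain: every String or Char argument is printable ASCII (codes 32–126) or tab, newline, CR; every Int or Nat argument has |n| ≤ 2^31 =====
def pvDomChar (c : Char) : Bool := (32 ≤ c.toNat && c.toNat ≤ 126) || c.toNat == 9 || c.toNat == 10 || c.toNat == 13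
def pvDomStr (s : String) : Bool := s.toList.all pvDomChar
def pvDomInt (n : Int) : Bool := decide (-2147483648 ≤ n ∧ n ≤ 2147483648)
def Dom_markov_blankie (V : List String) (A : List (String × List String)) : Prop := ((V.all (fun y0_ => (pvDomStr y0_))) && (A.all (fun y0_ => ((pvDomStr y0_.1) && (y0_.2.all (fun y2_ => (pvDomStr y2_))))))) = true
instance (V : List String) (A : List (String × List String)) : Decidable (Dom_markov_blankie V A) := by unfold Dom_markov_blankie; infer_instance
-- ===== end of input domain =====

-- B replaces A's co-parent search (a rescan of all of V for every edge) by a reverse index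
-- parents[c] built in one pass, then assembles each blanket per node.  Both Pythons complete
-- the argument dict A in place in the same way; the equivalence proved is about the return value.

-- ===== PORT A =====
def markov_blankie (V : List String) (A : List (String × List String)) : List (String × List String) :=
  -- for v in V: if v not in A.keys(): A[v] = []
  let A1 := V.foldl (fun d v => if d.contains v then d else d.insert v ([] : List String)) (PySem.Dict.ofList A)
  -- blanket = {v: [c for c in A[v]] for v in V}
  let b0 := V.foldl (fun d v => d.insert v (A1.getD v ([] : List String))) PySem.Dict.empty
  -- for v in V: for c in A[v]: if v not in blanket[c]: blanket[c].append(v)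
  let b1 := V.foldl (fun d v => (A1.getD v ([] : List String)).foldl (fun d c =>
              if v ∈ d.getD c ([] : List String) then d else d.modify c [] (fun l => l ++ [v])) d) b0
  -- for v in V: for a in A[v]: for v_prime in V:
  --   if v != v_prime and a in A[v_prime] and v_prime not in blanket[v]: blanket[v].append(v_prime)
  let b2 := V.foldl (fun d v => (A1.getD v ([] : List String)).foldl (fun d a =>
              V.foldl (fun d w =>
                if v ≠ w ∧ a ∈ A1.getD w ([] : List String) ∧ w ∉ d.getD v ([] : List String)
                then d.modify v [] (fun l => l ++ [w]) else d) d) d) b1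
  b2.items

-- ===== PORT B =====
def markov_blankie_alt (V : List String) (A : List (String × List String)) : List (String × List String) :=
  -- for v in V: A.setdefault(v, [])
  let A1 := V.foldl (fun d v => d.setdefault v ([] : List String)) (PySem.Dict.ofList A)
  -- parents = {v: [] for v in V};  for p in V: for c in A[p]: parents[c].append(p)
  let par := V.foldl (fun d p => (A1.getD p ([] : List String)).foldl (fun d c => d.modify c [] (fun l => l ++ [p])) d)
               (V.foldl (fun d v => d.insert v ([] : List String)) PySem.Dict.empty)
  -- blanket = {}; for v in V: if v not in blanket: assemble children ++ parents ++ co-parents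
  let blanket := V.foldl (fun d v =>
     if d.contains v then d else
       let s0 := A1.getD v ([] : List String)
       let s1 := (par.getD v ([] : List String)).foldl (fun b p => if p ∈ b then b else b ++ [p]) s0
       let s2 := s0.foldl (fun b c =>
                  (par.getD c ([] : List String)).foldl (fun b q => if q ≠ v ∧ q ∉ b then b ++ [q] else b) b) s1
       d.insert v s2) PySem.Dict.empty
  blanket.items

-- ===== PRECONDITION & SPEC =====
-- Pre_ excludes exactly the inputs on which the Python A raises KeyError: some child of a
-- node of V is itself not in V (blanket[c] is then a missing key).
def Pre_markov_blankie (V : List String) (A : List (String × List String)) : Prop :=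
  ∀ v ∈ V, ∀ c ∈ (PySem.Dict.ofList A).getD v ([] : List String), c ∈ V
instance (V : List String) (A : List (String × List String)) : Decidable (Pre_markov_blankie V A) := by
  unfold Pre_markov_blankie; infer_instance

def pvWitness_markov_blankie : List String × (List (String × List String)) :=
  (["a", "b", "c"], [("a", ["b"]), ("c", ["b", "b"])])

def Spec_markov_blankie (V : List String) (A : List (String × List String)) (out : List (String × List String)) : Prop := out = markov_blankie_alt V A
instance (V : List String) (A : List (String × List String)) (out : List (String × List String)) : Decidable (Spec_markov_blankie V A out) := by unfold Spec_markov_blankie; infer_instance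

-- ===== CLAIM (what is proved, stated in full; the proofs are below) =====
def Claim_equal_markov_blankie : Prop := ∀ (V : List String) (A : List (String × List String)), Dom_markov_blankie V A → Pre_markov_blankie V A → Spec_markov_blankie V A (markov_blankie V A)

-- ===== LEMMAS AND PROOFS =====

-- `if p in b: pass; else: b.append(p)` as a pure step
def pvApp (b : List String) (p : String) : List String := if p ∈ b then b else b ++ [p]
-- one co-parent test of A's innermost loop, acting on the value b of blanket[v]
def pvStepC (chf : String → List String) (v a : String) (b : List String) (w : String) : List String :=
  if v ≠ w ∧ a ∈ chf w ∧ w ∉ b then b ++ [w] else b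
-- the full co-parent update of blanket[z] (one pass of A's outer loop body at v = z)
def pvF (V : List String) (chf : String → List String) (z : String) (b : List String) : List String :=
  (chf z).foldl (fun b a => V.foldl (pvStepC chf z a) b) b
-- the parents list of z: one entry p per edge p → z, in V order
def pvPL (V : List String) (chf : String → List String) (z : String) : List String :=
  V.flatMap (fun p => List.replicate ((chf p).count z) p)

-- the four dict stages of port A, over an abstract children function chf
def pvB0 (V : List String) (chf : String → List String) : PySem.Dict String (List String) :=
  V.foldl (fun d v => d.insert v (chf v)) PySem.Dict.empty
def pvB1 (V : List String) (chf : String → List String) : PySem.Dict String (List String) :=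
  V.foldl (fun d v => (chf v).foldl (fun d c =>
    if v ∈ d.getD c ([] : List String) then d else d.modify c [] (fun l => l ++ [v])) d) (pvB0 V chf)
def pvB2 (V : List String) (chf : String → List String) : PySem.Dict String (List String) :=
  V.foldl (fun d v => (chf v).foldl (fun d a =>
    V.foldl (fun d w =>
      if v ≠ w ∧ a ∈ chf w ∧ w ∉ d.getD v ([] : List String)
      then d.modify v [] (fun l => l ++ [w]) else d) d) d) (pvB1 V chf)

-- the stages of port B
def pvPar (V : List String) (chf : String → List String) : PySem.Dict String (List String) :=
  V.foldl (fun d p => (chf p).foldl (fun d c => d.modify c [] (fun l => l ++ [p])) d)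
    (V.foldl (fun d v => d.insert v ([] : List String)) PySem.Dict.empty)
def pvVal (V : List String) (chf : String → List String) (v : String) : List String :=
  (chf v).foldl (fun b c =>
      ((pvPar V chf).getD c ([] : List String)).foldl (fun b q => if q ≠ v ∧ q ∉ b then b ++ [q] else b) b)
    (((pvPar V chf).getD v ([] : List String)).foldl (fun b p => if p ∈ b then b else b ++ [p]) (chf v))
def pvBlanket (V : List String) (chf : String → List String) : PySem.Dict String (List String) :=
  V.foldl (fun d v => if d.contains v then d else d.insert v (pvVal V chf v)) PySem.Dict.empty

-- a fold whose every step fixes the accumulator does nothing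
theorem pv_foldl_fix {α β : Type} (f : α → β → α) (l : List β) (x : α) (h : ∀ b ∈ l, f x b = x) :
    l.foldl f x = x := by
  induction l with
  | nil => rfl
  | cons a tl ih =>
    simp only [List.foldl_cons, h a (List.mem_cons_self)]
    exact ih (fun b hb => h b (List.mem_cons_of_mem _ hb))

-- A's completion loop does not change any lookup
theorem pv_getD_completeA (V : List String) : ∀ (D : PySem.Dict String (List String)) (z : String),
    (V.foldl (fun d v => if d.contains v then d else d.insert v ([] : List String)) D).getD z [] = D.getD z [] := by
  induction V with
  | nil => intro D z; rfl
  | cons v tl ih =>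
    intro D z
    simp only [List.foldl_cons]
    by_cases hc : D.contains v = true
    · rw [if_pos hc, ih]
    · rw [if_neg hc, ih, PySem.Dict.getD_insert]
      by_cases hz : z = v
      · subst hz
        rw [if_pos rfl, PySem.Dict.getD_of_not_contains D _ (Bool.not_eq_true _ ▸ hc)]
      · rw [if_neg hz]

-- B's setdefault loop does not change any lookup
theorem pv_getD_completeB (V : List String) : ∀ (D : PySem.Dict String (List String)) (z : String),
    (V.foldl (fun d v => d.setdefault v ([] : List String)) D).getD z [] = D.getD z [] := by
  induction V with
  | nil => intro D z; rfl
  | cons v tl ih =>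
    intro D z
    simp only [List.foldl_cons, ih]
    by_cases hz : z = v
    · subst hz; exact PySem.Dict.getD_setdefault_self D z [] []
    · rw [PySem.Dict.getD_eq_get?_getD, PySem.Dict.get?_setdefault_of_ne D _ hz,
          ← PySem.Dict.getD_eq_get?_getD]

theorem pv_getD_insertFold (g : String → List String) (V : List String) :
    ∀ (D : PySem.Dict String (List String)) (z : String),
    (V.foldl (fun d v => d.insert v (g v)) D).getD z [] = if z ∈ V then g z else D.getD z [] := by
  induction V with
  | nil => intro D z; simp
  | cons v tl ih =>
    intro D z
    simp only [List.foldl_cons, ih, PySem.Dict.getD_insert]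
    by_cases hz : z ∈ tl
    · simp [hz]
    · by_cases hzv : z = v
      · subst hzv; simp [hz]
      · simp [hz, hzv]

theorem pv_getD_insertNilFold (V : List String) :
    ∀ (D : PySem.Dict String (List String)) (z : String),
    (V.foldl (fun d v => d.insert v ([] : List String)) D).getD z [] = if z ∈ V then [] else D.getD z [] := by
  induction V with
  | nil => intro D z; simp
  | cons v tl ih =>
    intro D z
    simp only [List.foldl_cons, ih, PySem.Dict.getD_insert]
    by_cases hz : z ∈ tl
    · simp [hz]
    · by_cases hzv : z = v
      · subst hzv; simp [hz]
      · simp [hz, hzv]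

-- B's inner parents loop, per key
theorem pv_getD_parInner (p z : String) : ∀ (l : List String) (d : PySem.Dict String (List String)),
    (l.foldl (fun d c => d.modify c [] (fun l => l ++ [p])) d).getD z []
      = d.getD z [] ++ List.replicate (l.count z) p := by
  intro l
  induction l with
  | nil => intro d; simp
  | cons c tl ih =>
    intro d
    simp only [List.foldl_cons, ih]
    by_cases hc : c = z
    · subst hc
      rw [PySem.Dict.getD_modify_self]
      simp [List.replicate_succ]
    · rw [PySem.Dict.getD_modify_of_ne d [] _ (Ne.symm hc)]
      simp [hc]

theorem pv_getD_parFold (chf : String → List String) (z : String) :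
    ∀ (W : List String) (D : PySem.Dict String (List String)),
    (W.foldl (fun d p => (chf p).foldl (fun d c => d.modify c [] (fun l => l ++ [p])) d) D).getD z []
      = D.getD z [] ++ pvPL W chf z := by
  intro W
  induction W with
  | nil => intro D; simp [pvPL]
  | cons p tl ih =>
    intro D
    simp only [List.foldl_cons, ih, pv_getD_parInner, pvPL, List.flatMap_cons, List.append_assoc]

-- A's parents phase, inner loop, per key
theorem pv_getD_phase1Inner (v z : String) : ∀ (l : List String) (d : PySem.Dict String (List String)),
    (l.foldl (fun d c => if v ∈ d.getD c ([] : List String) then d else d.modify c [] (fun l => l ++ [v])) d).getD z []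
      = (List.replicate (l.count z) v).foldl pvApp (d.getD z []) := by
  intro l
  induction l with
  | nil => intro d; simp
  | cons c tl ih =>
    intro d
    simp only [List.foldl_cons, ih]
    by_cases hc : c = z
    · subst hc
      have h1 : (if v ∈ d.getD c ([] : List String) then d else d.modify c [] (fun l => l ++ [v])).getD c []
          = pvApp (d.getD c []) v := by
        by_cases hv : v ∈ d.getD c ([] : List String)
        · simp [hv, pvApp]
        · simp [hv, pvApp, PySem.Dict.getD_modify_self]
      rw [h1]
      simp [List.replicate_succ]
    · have h1 : (if v ∈ d.getD c ([] : List String) then d else d.modify c [] (fun l => l ++ [v])).getD z []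
          = d.getD z [] := by
        by_cases hv : v ∈ d.getD c ([] : List String)
        · simp [hv]
        · simp [hv, PySem.Dict.getD_modify_of_ne d [] _ (Ne.symm hc)]
      rw [h1]
      simp [hc]

theorem pv_getD_phase1 (chf : String → List String) (z : String) :
    ∀ (W : List String) (d : PySem.Dict String (List String)),
    (W.foldl (fun d v => (chf v).foldl (fun d c =>
        if v ∈ d.getD c ([] : List String) then d else d.modify c [] (fun l => l ++ [v])) d) d).getD z []
      = (pvPL W chf z).foldl pvApp (d.getD z []) := by
  intro W
  induction W with
  | nil => intro d; simp [pvPL]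
  | cons v tl ih =>
    intro d
    simp only [List.foldl_cons, ih, pv_getD_phase1Inner, pvPL, List.flatMap_cons, List.foldl_append]

-- A's co-parent phase: innermost loop for a foreign key is invisible
theorem pv_getD_phaseCInner_ne (chf : String → List String) (v a z : String) (hvz : v ≠ z) :
    ∀ (W : List String) (d : PySem.Dict String (List String)),
    (W.foldl (fun d w =>
        if v ≠ w ∧ a ∈ chf w ∧ w ∉ d.getD v ([] : List String)
        then d.modify v [] (fun l => l ++ [w]) else d) d).getD z [] = d.getD z [] := by
  intro W
  induction W with
  | nil => intro d; rfl
  | cons w tl ih =>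
    intro d
    simp only [List.foldl_cons, ih]
    split
    · exact PySem.Dict.getD_modify_of_ne d [] _ (Ne.symm hvz)
    · rfl

-- A's co-parent phase: innermost loop on its own key is the pure fold
theorem pv_getD_phaseCInner_eq (chf : String → List String) (a z : String) :
    ∀ (W : List String) (d : PySem.Dict String (List String)),
    (W.foldl (fun d w =>
        if z ≠ w ∧ a ∈ chf w ∧ w ∉ d.getD z ([] : List String)
        then d.modify z [] (fun l => l ++ [w]) else d) d).getD z []
      = W.foldl (pvStepC chf z a) (d.getD z []) := by
  intro W
  induction W with
  | nil => intro d; rfl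
  | cons w tl ih =>
    intro d
    simp only [List.foldl_cons, ih]
    have h1 : (if z ≠ w ∧ a ∈ chf w ∧ w ∉ d.getD z ([] : List String)
        then d.modify z [] (fun l => l ++ [w]) else d).getD z []
        = pvStepC chf z a (d.getD z []) w := by
      by_cases hg : z ≠ w ∧ a ∈ chf w ∧ w ∉ d.getD z ([] : List String)
      · rw [if_pos hg, PySem.Dict.getD_modify_self, pvStepC, if_pos hg]
      · rw [if_neg hg, pvStepC, if_neg hg]
    rw [h1]

theorem pv_getD_phaseCMid_ne (chf : String → List String) (V0 : List String) (v z : String) (hvz : v ≠ z) :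
    ∀ (l : List String) (d : PySem.Dict String (List String)),
    (l.foldl (fun d a => V0.foldl (fun d w =>
        if v ≠ w ∧ a ∈ chf w ∧ w ∉ d.getD v ([] : List String)
        then d.modify v [] (fun l => l ++ [w]) else d) d) d).getD z [] = d.getD z [] := by
  intro l
  induction l with
  | nil => intro d; rfl
  | cons a tl ih =>
    intro d
    simp only [List.foldl_cons, ih]
    exact pv_getD_phaseCInner_ne chf v a z hvz V0 d

theorem pv_getD_phaseCMid_eq (chf : String → List String) (V0 : List String) (z : String) :
    ∀ (l : List String) (d : PySem.Dict String (List String)),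
    (l.foldl (fun d a => V0.foldl (fun d w =>
        if z ≠ w ∧ a ∈ chf w ∧ w ∉ d.getD z ([] : List String)
        then d.modify z [] (fun l => l ++ [w]) else d) d) d).getD z []
      = l.foldl (fun b a => V0.foldl (pvStepC chf z a) b) (d.getD z []) := by
  intro l
  induction l with
  | nil => intro d; rfl
  | cons a tl ih =>
    intro d
    simp only [List.foldl_cons, ih, pv_getD_phaseCInner_eq]

theorem pv_getD_phaseC (chf : String → List String) (V0 : List String) (z : String) :
    ∀ (W : List String) (d : PySem.Dict String (List String)),
    (W.foldl (fun d v => (chf v).foldl (fun d a => V0.foldl (fun d w =>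
        if v ≠ w ∧ a ∈ chf w ∧ w ∉ d.getD v ([] : List String)
        then d.modify v [] (fun l => l ++ [w]) else d) d) d) d).getD z []
      = (W.filter (fun v => v = z)).foldl (fun b _ => pvF V0 chf z b) (d.getD z []) := by
  intro W
  induction W with
  | nil => intro d; rfl
  | cons v tl ih =>
    intro d
    simp only [List.foldl_cons, ih]
    by_cases hv : v = z
    · subst hv
      rw [List.filter_cons_of_pos (by simp)]
      simp only [List.foldl_cons]
      rw [pv_getD_phaseCMid_eq]
      rfl
    · rw [List.filter_cons_of_neg (by simp [hv])]
      rw [pv_getD_phaseCMid_ne chf V0 v z hv]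

-- keys lemmas
theorem pv_keys_modify_mem (d : PySem.Dict String (List String)) (c : String) (f : List String → List String)
    (h : c ∈ d.keys) : (d.modify c [] f).keys = d.keys := by
  rw [PySem.Dict.keys_modify, PySem.Dict.keys_insert_of_contains _ _ ((PySem.Dict.contains_iff_mem_keys d c).mpr h)]

theorem pv_keys_phase1Inner (v : String) : ∀ (l : List String) (d : PySem.Dict String (List String)),
    (∀ c ∈ l, c ∈ d.keys) →
    (l.foldl (fun d c => if v ∈ d.getD c ([] : List String) then d else d.modify c [] (fun l => l ++ [v])) d).keys
      = d.keys := by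
  intro l
  induction l with
  | nil => intro d _; rfl
  | cons c tl ih =>
    intro d h
    simp only [List.foldl_cons]
    have hk : (if v ∈ d.getD c ([] : List String) then d else d.modify c [] (fun l => l ++ [v])).keys = d.keys := by
      split
      · rfl
      · exact pv_keys_modify_mem d c _ (h c List.mem_cons_self)
    rw [ih _ (fun c' hc' => by rw [hk]; exact h c' (List.mem_cons_of_mem _ hc')), hk]

theorem pv_keys_phase1 (chf : String → List String) : ∀ (W : List String) (d : PySem.Dict String (List String)),
    (∀ v ∈ W, ∀ c ∈ chf v, c ∈ d.keys) →
    (W.foldl (fun d v => (chf v).foldl (fun d c =>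
        if v ∈ d.getD c ([] : List String) then d else d.modify c [] (fun l => l ++ [v])) d) d).keys = d.keys := by
  intro W
  induction W with
  | nil => intro d _; rfl
  | cons v tl ih =>
    intro d h
    simp only [List.foldl_cons]
    have hk := pv_keys_phase1Inner v (chf v) d (h v List.mem_cons_self)
    rw [ih _ (fun v' hv' c hc => by rw [hk]; exact h v' (List.mem_cons_of_mem _ hv') c hc), hk]

theorem pv_keys_phaseCInner (chf : String → List String) (v a : String) :
    ∀ (W : List String) (d : PySem.Dict String (List String)), v ∈ d.keys →
    (W.foldl (fun d w =>
        if v ≠ w ∧ a ∈ chf w ∧ w ∉ d.getD v ([] : List String)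
        then d.modify v [] (fun l => l ++ [w]) else d) d).keys = d.keys := by
  intro W
  induction W with
  | nil => intro d _; rfl
  | cons w tl ih =>
    intro d h
    simp only [List.foldl_cons]
    have hk : (if v ≠ w ∧ a ∈ chf w ∧ w ∉ d.getD v ([] : List String)
        then d.modify v [] (fun l => l ++ [w]) else d).keys = d.keys := by
      split
      · exact pv_keys_modify_mem d v _ h
      · rfl
    rw [ih _ (by rw [hk]; exact h), hk]

theorem pv_keys_phaseCMid (chf : String → List String) (V0 : List String) (v : String) :
    ∀ (l : List String) (d : PySem.Dict String (List String)), v ∈ d.keys →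
    (l.foldl (fun d a => V0.foldl (fun d w =>
        if v ≠ w ∧ a ∈ chf w ∧ w ∉ d.getD v ([] : List String)
        then d.modify v [] (fun l => l ++ [w]) else d) d) d).keys = d.keys := by
  intro l
  induction l with
  | nil => intro d _; rfl
  | cons a tl ih =>
    intro d h
    simp only [List.foldl_cons]
    have hk := pv_keys_phaseCInner chf v a V0 d h
    rw [ih _ (by rw [hk]; exact h), hk]

theorem pv_keys_phaseC (chf : String → List String) (V0 : List String) :
    ∀ (W : List String) (d : PySem.Dict String (List String)), (∀ v ∈ W, v ∈ d.keys) →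
    (W.foldl (fun d v => (chf v).foldl (fun d a => V0.foldl (fun d w =>
        if v ≠ w ∧ a ∈ chf w ∧ w ∉ d.getD v ([] : List String)
        then d.modify v [] (fun l => l ++ [w]) else d) d) d) d).keys = d.keys := by
  intro W
  induction W with
  | nil => intro d _; rfl
  | cons v tl ih =>
    intro d h
    simp only [List.foldl_cons]
    have hk := pv_keys_phaseCMid chf V0 v (chf v) d (h v List.mem_cons_self)
    rw [ih _ (fun v' hv' => by rw [hk]; exact h v' (List.mem_cons_of_mem _ hv')), hk]

theorem pv_keys_condInsert (g : String → List String) : ∀ (W : List String) (d : PySem.Dict String (List String)),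
    (W.foldl (fun d v => if d.contains v then d else d.insert v (g v)) d).keys = PySem.Set.update d.keys W := by
  intro W
  induction W with
  | nil => intro d; rfl
  | cons v tl ih =>
    intro d
    simp only [List.foldl_cons]
    rw [PySem.Set.update_cons]
    by_cases hc : d.contains v = true
    · rw [if_pos hc, ih]
      have : PySem.Set.add d.keys v = d.keys := by
        simp [PySem.Set.add, (PySem.Dict.contains_iff_mem_keys d v).mp hc]
      rw [this]
    · rw [if_neg hc, ih]
      have hnm : v ∉ d.keys := fun h => hc ((PySem.Dict.contains_iff_mem_keys d v).mpr h)
      have : PySem.Set.add d.keys v = d.keys ++ [v] := by simp [PySem.Set.add, hnm]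
      rw [this, PySem.Dict.keys_insert_of_not_contains _ _ (Bool.not_eq_true _ ▸ hc)]

theorem pv_getD_condInsert_contains (g : String → List String) (z : String) :
    ∀ (W : List String) (d : PySem.Dict String (List String)), d.contains z = true →
    (W.foldl (fun d v => if d.contains v then d else d.insert v (g v)) d).getD z [] = d.getD z [] := by
  intro W
  induction W with
  | nil => intro d _; rfl
  | cons v tl ih =>
    intro d hz
    simp only [List.foldl_cons]
    by_cases hc : d.contains v = true
    · rw [if_pos hc]; exact ih d hz
    · rw [if_neg hc]
      have hvz : z ≠ v := fun h => hc (h ▸ hz)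
      rw [ih _ (by rw [PySem.Dict.contains_insert]; simp [hz]), PySem.Dict.getD_insert, if_neg hvz]

theorem pv_getD_condInsert (g : String → List String) (z : String) :
    ∀ (W : List String) (d : PySem.Dict String (List String)), z ∈ W → d.contains z = false →
    (W.foldl (fun d v => if d.contains v then d else d.insert v (g v)) d).getD z [] = g z := by
  intro W
  induction W with
  | nil => intro d h _; exact absurd h (List.not_mem_nil)
  | cons v tl ih =>
    intro d hzW hz
    simp only [List.foldl_cons]
    by_cases hc : d.contains v = true
    · have hvz : v ≠ z := by intro h; rw [h, hz] at hc; simp at hc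
      rw [if_pos hc]
      exact ih d ((List.mem_cons.mp hzW).resolve_left (fun h => hvz h.symm)) hz
    · rw [if_neg hc]
      by_cases hvz : v = z
      · subst hvz
        rw [pv_getD_condInsert_contains g v tl _ (by rw [PySem.Dict.contains_insert]; simp),
            PySem.Dict.getD_insert, if_pos rfl]
      · have hztl : z ∈ tl := (List.mem_cons.mp hzW).resolve_left (fun h => hvz h.symm)
        rw [ih _ hztl (by rw [PySem.Dict.contains_insert]; simp [hz, Ne.symm hvz])]

-- pure-list side: B's fold over the multiset parents list equals A's scan of V
theorem pv_co_replicate (v p : String) (n : Nat) : ∀ (b : List String),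
    (List.replicate n p).foldl (fun b q => if q ≠ v ∧ q ∉ b then b ++ [q] else b) b
      = if n = 0 then b else if p ≠ v ∧ p ∉ b then b ++ [p] else b := by
  induction n with
  | zero => intro b; simp
  | succ n ih =>
    intro b
    rw [List.replicate_succ]
    simp only [List.foldl_cons, ih]
    by_cases hn : n = 0
    · simp [hn]
    · rw [if_neg hn, if_neg (Nat.succ_ne_zero n)]
      by_cases hg : p ≠ v ∧ p ∉ b
      · rw [if_pos hg, if_neg (by rintro ⟨_, h2⟩; exact h2 (List.mem_append_right _ List.mem_cons_self))]
      · rw [if_neg hg, if_neg hg]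

theorem pv_co_PL (V0 : List String) (chf : String → List String) (v a : String) : ∀ (b : List String),
    (pvPL V0 chf a).foldl (fun b q => if q ≠ v ∧ q ∉ b then b ++ [q] else b) b
      = V0.foldl (pvStepC chf v a) b := by
  induction V0 with
  | nil => intro b; simp [pvPL]
  | cons p tl ih =>
    intro b
    simp only [pvPL, List.flatMap_cons, List.foldl_append, List.foldl_cons] at *
    rw [pv_co_replicate, ih]
    congr 1
    simp only [pvStepC]
    by_cases hn : (chf p).count a = 0
    · have ha : a ∉ chf p := List.count_eq_zero.mp hn
      rw [if_pos hn, if_neg (by rintro ⟨_, h2, _⟩; exact ha h2)]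
    · have ha : a ∈ chf p := by
        by_contra hx
        exact hn (List.count_eq_zero.mpr hx)
      rw [if_neg hn]
      by_cases hp : p ≠ v ∧ p ∉ b
      · rw [if_pos hp, if_pos ⟨Ne.symm hp.1, ha, hp.2⟩]
      · rw [if_neg hp, if_neg (by rintro ⟨h1, _, h3⟩; exact hp ⟨Ne.symm h1, h3⟩)]

-- membership is preserved and completed by the co-parent scan
theorem pv_mem_foldl_stepC (chf : String → List String) (z a : String) :
    ∀ (W : List String) (b : List String) (x : String), x ∈ b → x ∈ W.foldl (pvStepC chf z a) b := by
  intro W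
  induction W with
  | nil => intro b x hx; exact hx
  | cons w tl ih =>
    intro b x hx
    simp only [List.foldl_cons]
    apply ih
    unfold pvStepC
    split
    · exact List.mem_append_left _ hx
    · exact hx

theorem pv_mem_foldl_stepC_self (chf : String → List String) (z a : String) :
    ∀ (W : List String) (b : List String) (w : String), w ∈ W → z ≠ w → a ∈ chf w →
    w ∈ W.foldl (pvStepC chf z a) b := by
  intro W
  induction W with
  | nil => intro b w hw; exact absurd hw (List.not_mem_nil)
  | cons w' tl ih =>
    intro b w hw hz ha
    simp only [List.foldl_cons]
    rcases List.mem_cons.mp hw with h | h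
    · subst h
      apply pv_mem_foldl_stepC
      unfold pvStepC
      by_cases hg : z ≠ w ∧ a ∈ chf w ∧ w ∉ b
      · rw [if_pos hg]; exact List.mem_append_right _ List.mem_cons_self
      · rw [if_neg hg]
        by_cases hb : w ∈ b
        · exact hb
        · exact absurd ⟨hz, ha, hb⟩ hg
    · exact ih _ w h hz ha

theorem pv_mem_foldl_inner (V0 : List String) (chf : String → List String) (z : String) :
    ∀ (l : List String) (b : List String) (x : String), x ∈ b →
    x ∈ l.foldl (fun b a => V0.foldl (pvStepC chf z a) b) b := by
  intro l
  induction l with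
  | nil => intro b x hx; exact hx
  | cons a tl ih =>
    intro b x hx
    simp only [List.foldl_cons]
    exact ih _ x (pv_mem_foldl_stepC chf z a V0 b x hx)

theorem pv_mem_pvF_self (V0 : List String) (chf : String → List String) (z : String) :
    ∀ (l : List String) (b : List String) (a w : String), a ∈ l → w ∈ V0 → z ≠ w → a ∈ chf w →
    w ∈ l.foldl (fun b a => V0.foldl (pvStepC chf z a) b) b := by
  intro l
  induction l with
  | nil => intro b a w ha; exact absurd ha (List.not_mem_nil)
  | cons a' tl ih =>
    intro b a w ha hw hz hc
    simp only [List.foldl_cons]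
    rcases List.mem_cons.mp ha with h | h
    · subst h
      exact pv_mem_foldl_inner V0 chf z tl _ w (pv_mem_foldl_stepC_self chf z a V0 b w hw hz hc)
    · exact ih _ a w h hw hz hc

theorem pv_foldl_stepC_noop (chf : String → List String) (z a : String) :
    ∀ (W : List String) (b : List String), (∀ w ∈ W, z ≠ w → a ∈ chf w → w ∈ b) →
    W.foldl (pvStepC chf z a) b = b := by
  intro W
  induction W with
  | nil => intro b _; rfl
  | cons w tl ih =>
    intro b h
    simp only [List.foldl_cons]
    have hs : pvStepC chf z a b w = b := by
      unfold pvStepC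
      rw [if_neg]
      rintro ⟨h1, h2, h3⟩
      exact h3 (h w List.mem_cons_self h1 h2)
    rw [hs]
    exact ih b (fun w' hw' => h w' (List.mem_cons_of_mem _ hw'))

theorem pv_pvF_idem (V0 : List String) (chf : String → List String) (z : String) (b : List String) :
    pvF V0 chf z (pvF V0 chf z b) = pvF V0 chf z b := by
  unfold pvF
  apply pv_foldl_fix
  intro a ha
  apply pv_foldl_stepC_noop
  intro w hw hz hc
  exact pv_mem_pvF_self V0 chf z (chf z) b a w ha hw hz hc

theorem pv_foldl_constF (V0 : List String) (chf : String → List String) (z : String) :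
    ∀ (l : List String) (b : List String),
    l.foldl (fun b _ => pvF V0 chf z b) (pvF V0 chf z b) = pvF V0 chf z b := by
  intro l
  induction l with
  | nil => intro b; rfl
  | cons x tl ih =>
    intro b
    simp only [List.foldl_cons]
    rw [pv_pvF_idem]
    exact ih b

theorem pv_filter_foldl_F (V0 : List String) (chf : String → List String) (z : String) :
    ∀ (W : List String) (b : List String), z ∈ W →
    (W.filter (fun v => v = z)).foldl (fun b _ => pvF V0 chf z b) b = pvF V0 chf z b := by
  intro W
  induction W with
  | nil => intro b h; exact absurd h (List.not_mem_nil)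
  | cons w tl ih =>
    intro b hz
    by_cases hw : w = z
    · subst hw
      rw [List.filter_cons_of_pos (by simp)]
      simp only [List.foldl_cons]
      exact pv_foldl_constF V0 chf w _ b
    · rw [List.filter_cons_of_neg (by simp [hw])]
      exact ih b ((List.mem_cons.mp hz).resolve_left (fun h => hw h.symm))

-- ports in terms of the staged dicts
theorem pv_portA_eq (V : List String) (A : List (String × List String)) :
    markov_blankie V A = (pvB2 V (fun v => (PySem.Dict.ofList A).getD v ([] : List String))).items := by
  unfold markov_blankie pvB2 pvB1 pvB0
  simp only [pv_getD_completeA]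

theorem pv_portB_eq (V : List String) (A : List (String × List String)) :
    markov_blankie_alt V A = (pvBlanket V (fun v => (PySem.Dict.ofList A).getD v ([] : List String))).items := by
  unfold markov_blankie_alt pvBlanket pvVal pvPar
  simp only [pv_getD_completeB]

-- per-key values
theorem pv_valA (V : List String) (chf : String → List String) (z : String) (hz : z ∈ V) :
    (pvB2 V chf).getD z []
      = (V.filter (fun v => v = z)).foldl (fun b _ => pvF V chf z b) ((pvPL V chf z).foldl pvApp (chf z)) := by
  unfold pvB2
  rw [pv_getD_phaseC]
  congr 1
  unfold pvB1
  rw [pv_getD_phase1]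
  congr 1
  unfold pvB0
  rw [pv_getD_insertFold, if_pos hz]

theorem pv_par_getD (V : List String) (chf : String → List String) (c : String) :
    (pvPar V chf).getD c ([] : List String) = pvPL V chf c := by
  unfold pvPar
  rw [pv_getD_parFold, pv_getD_insertNilFold]
  by_cases hc : c ∈ V
  · simp [hc]
  · simp [hc]

theorem pv_valB (V : List String) (chf : String → List String) (z : String) (hz : z ∈ V) :
    (pvBlanket V chf).getD z [] = pvF V chf z ((pvPL V chf z).foldl pvApp (chf z)) := by
  unfold pvBlanket
  rw [pv_getD_condInsert (pvVal V chf) z V PySem.Dict.empty hz (PySem.Dict.contains_empty z)]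
  unfold pvVal
  simp only [pv_par_getD, pv_co_PL]
  rfl

-- keys of the two results
theorem pv_keysA (V : List String) (chf : String → List String)
    (hpre : ∀ v ∈ V, ∀ c ∈ chf v, c ∈ V) : (pvB2 V chf).keys = PySem.Set.ofList V := by
  have hb0 : (pvB0 V chf).keys = PySem.Set.ofList V := by
    unfold pvB0
    rw [PySem.Dict.keys_foldl_insert, PySem.Dict.keys_empty, PySem.Set.update_nil_left]
  have hb1 : (pvB1 V chf).keys = PySem.Set.ofList V := by
    unfold pvB1
    rw [pv_keys_phase1 chf V _ (fun v hv c hc => by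
      rw [hb0]; exact (PySem.Set.mem_ofList V c).mpr (hpre v hv c hc)), hb0]
  unfold pvB2
  rw [pv_keys_phaseC chf V V _ (fun v hv => by
    rw [hb1]; exact (PySem.Set.mem_ofList V v).mpr hv), hb1]

theorem pv_keysB (V : List String) (chf : String → List String) :
    (pvBlanket V chf).keys = PySem.Set.ofList V := by
  unfold pvBlanket
  rw [pv_keys_condInsert, PySem.Dict.keys_empty, PySem.Set.update_nil_left]

theorem pv_items_eq_of (V : List String) (dA dB : PySem.Dict String (List String))
    (hA : dA.keys = PySem.Set.ofList V) (hB : dB.keys = PySem.Set.ofList V)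
    (h : ∀ z ∈ V, dA.getD z [] = dB.getD z []) : dA.items = dB.items := by
  rw [PySem.Dict.items_eq_map_keys dA (by rw [hA]; exact PySem.Set.nodup_ofList V) [],
      PySem.Dict.items_eq_map_keys dB (by rw [hB]; exact PySem.Set.nodup_ofList V) [], hA, hB]
  apply List.map_congr_left
  intro k hk
  rw [h k ((PySem.Set.mem_ofList V k).mp hk)]

-- ===== VERDICT (by name: the statement is the Claim_ definition above) =====
theorem markov_blankie_spec : Claim_equal_markov_blankie := by
  intro V A _hdom hpre
  unfold Spec_markov_blankie
  rw [pv_portA_eq, pv_portB_eq]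
  apply pv_items_eq_of V
  · exact pv_keysA V _ hpre
  · exact pv_keysB V _
  · intro z hz
    rw [pv_valA V _ z hz, pv_valB V _ z hz, pv_filter_foldl_F V _ z V _ hz]
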